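-- pv_equiv track=rewrite | github.com/shilpas1003/PythonBeginner | agcount.py | carryForward
-- ===== SOURCE A (Python) =====
-- def carryForward(A):
--     n = len(A)
--     count = 0
--     gs = 0
--     for i in reversed(range(n)):
--         if A[i] == 'a':
--             count += gs
--         elif A[i] == 'g':
--             gs += 1
--     return count
-- ===== SOURCE B (Python) =====
-- def carryForward(A):
--     # Phase 1: suffix table. rev[k] = number of 'g' among the last k elements.
--     rev = [0]
--     for ch in reversed(A):
--         rev.append(rev[-1] + (1 if ch == 'g' else 0))
--     gAfter = rev[::-1]  # gAfter[i] = number of 'g' at positions >= i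
--     # Phase 2: pair each element with the count of 'g' strictly after it.
--     total = 0
--     for ch, g in zip(A, gAfter[1:]):
--         if ch == 'a':
--             total += g
--     return total
-- ===== Notes on version B (the rewrite author's own statement) =====
-- stated objective: alternative
-- what changed: A's single fused right-to-left scan with a running g-counter is replaced by a two-phase table-then-sum: build a suffix 'g'-count table, then sum the table entries at each 'a' via zip.
import Mathlib
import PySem

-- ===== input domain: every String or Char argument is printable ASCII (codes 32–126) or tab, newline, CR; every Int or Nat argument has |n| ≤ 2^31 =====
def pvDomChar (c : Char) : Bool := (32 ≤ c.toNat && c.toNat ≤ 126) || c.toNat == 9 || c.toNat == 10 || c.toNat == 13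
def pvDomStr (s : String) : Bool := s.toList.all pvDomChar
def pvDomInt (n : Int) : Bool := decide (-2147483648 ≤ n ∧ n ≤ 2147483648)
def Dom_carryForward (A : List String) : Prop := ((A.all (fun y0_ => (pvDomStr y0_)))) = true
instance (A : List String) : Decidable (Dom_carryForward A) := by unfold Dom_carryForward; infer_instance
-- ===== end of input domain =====

-- B replaces A's fused right-to-left scan by a suffix-table construction plus a zip-and-sum pass (alternative decomposition, same cost).

-- ===== PORT A =====
def carryForward (A : List String) : Int :=
  let n : Int := A.length
  (((PySem.List.pyRange 0 n 1).reverse).foldl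
    (fun (s : Int × Int) i =>
      if PySem.List.pyGetD A i "" = "a" then (s.1 + s.2, s.2)
      else if PySem.List.pyGetD A i "" = "g" then (s.1, s.2 + 1)
      else s) ((0 : Int), (0 : Int))).1

-- ===== PORT B =====
def carryForward_alt (A : List String) : Int :=
  let rev := A.reverse.foldl
    (fun (g : List Int) ch => g ++ [PySem.List.pyGetD g (-1) 0 + (if ch = "g" then (1 : Int) else 0)])
    [(0 : Int)]
  let gAfter := rev.reverse
  (A.zip (PySem.List.slice gAfter (some 1) none)).foldl
    (fun (t : Int) p => if p.1 = "a" then t + p.2 else t) 0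

-- ===== PRECONDITION & SPEC =====
def Spec_carryForward (A : List String) (out : Int) : Prop := out = carryForward_alt A
instance (A : List String) (out : Int) : Decidable (Spec_carryForward A out) := by unfold Spec_carryForward; infer_instance

-- ===== CLAIM (what is proved, stated in full; the proofs are below) =====
def Claim_equal_carryForward : Prop := ∀ (A : List String), Dom_carryForward A → Spec_carryForward A (carryForward A)

-- ===== LEMMAS AND PROOFS =====

-- structural reference for A's scan: state (count, gs) built from the right
def pvF : List String → Int × Int
  | [] => (0, 0)
  | x :: xs =>
    let p := pvF xs
    if x = "a" then (p.1 + p.2, p.2)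
    else if x = "g" then (p.1, p.2 + 1)
    else p

-- structural reference for B's suffix table
def pvG : List String → List Int
  | [] => [0]
  | x :: xs => ((pvG xs).headI + (if x = "g" then (1 : Int) else 0)) :: pvG xs

theorem pvG_ne_nil (xs : List String) : pvG xs ≠ [] := by
  cases xs <;> simp [pvG]

def pvStep (s : Int × Int) (x : String) : Int × Int :=
  if x = "a" then (s.1 + s.2, s.2)
  else if x = "g" then (s.1, s.2 + 1)
  else s

theorem foldl_reverse_F (A : List String) : A.reverse.foldl pvStep (0, 0) = pvF A := by
  induction A with
  | nil => rfl
  | cons x xs ih =>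
      simp [List.reverse_cons, List.foldl_append, ih, pvF, pvStep]

theorem carryForward_eq_F (A : List String) : carryForward A = (pvF A).1 := by
  unfold carryForward
  have h1 : (((PySem.List.pyRange 0 (A.length : Int) 1).reverse).foldl
      (fun (s : Int × Int) i =>
        if PySem.List.pyGetD A i "" = "a" then (s.1 + s.2, s.2)
        else if PySem.List.pyGetD A i "" = "g" then (s.1, s.2 + 1)
        else s) ((0 : Int), (0 : Int)))
      = (((PySem.List.pyRange 0 (A.length : Int) 1).reverse).map
          (fun i => PySem.List.pyGetD A i "")).foldl pvStep ((0 : Int), (0 : Int)) := by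
    rw [List.foldl_map]
    rfl
  have h2 : ((PySem.List.pyRange 0 (A.length : Int) 1).reverse).map
          (fun i => PySem.List.pyGetD A i "") = A.reverse := by
    rw [List.map_reverse]
    rw [PySem.List.map_pyGetD_pyRange_zero']
  simp only [h1, h2, foldl_reverse_F]

theorem rev_eq_G_reverse (A : List String) :
    A.reverse.foldl
      (fun (g : List Int) ch => g ++ [PySem.List.pyGetD g (-1) 0 + (if ch = "g" then (1 : Int) else 0)])
      [(0 : Int)] = (pvG A).reverse := by
  induction A with
  | nil => rfl
  | cons x xs ih =>
      obtain ⟨h, t, hg⟩ : ∃ h t, pvG xs = h :: t := by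
        cases hx : pvG xs with
        | nil => exact absurd hx (pvG_ne_nil xs)
        | cons a b => exact ⟨a, b, rfl⟩
      simp [List.reverse_cons, List.foldl_append, ih, pvG, hg,
        PySem.List.pyGetD_neg_one_append_singleton]

theorem G_head_eq_F2 (A : List String) : (pvG A).headI = (pvF A).2 := by
  induction A with
  | nil => rfl
  | cons x xs ih =>
      simp only [pvG, pvF, List.headI_cons]
      split_ifs with h1 h2 <;> simp_all

def pvSumStep (t : Int) (p : String × Int) : Int :=
  if p.1 = "a" then t + p.2 else t

theorem foldl_sumStep_init (l : List (String × Int)) (c : Int) :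
    l.foldl pvSumStep c = c + l.foldl pvSumStep 0 := by
  induction l generalizing c with
  | nil => simp
  | cons p l ih =>
      simp only [List.foldl_cons, pvSumStep]
      rw [ih, ih (if p.1 = "a" then 0 + p.2 else 0)]
      split_ifs <;> ring

theorem zip_G_eq_F (A : List String) :
    (A.zip ((pvG A).tail)).foldl pvSumStep 0 = (pvF A).1 := by
  induction A with
  | nil => rfl
  | cons x xs ih =>
      obtain ⟨h, t, hg⟩ : ∃ h t, pvG xs = h :: t := by
        cases hx : pvG xs with
        | nil => exact absurd hx (pvG_ne_nil xs)
        | cons a b => exact ⟨a, b, rfl⟩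
      have hh : h = (pvF xs).2 := by
        have := G_head_eq_F2 xs
        simpa [hg] using this
      simp only [pvG, List.tail_cons, hg, List.zip_cons_cons, List.foldl_cons]
      rw [foldl_sumStep_init]
      have htail : xs.zip t = xs.zip ((pvG xs).tail) := by simp [hg]
      rw [htail, ih]
      simp only [pvSumStep, pvF, hh]
      split_ifs <;> ring

theorem alt_eq_F (A : List String) : carryForward_alt A = (pvF A).1 := by
  unfold carryForward_alt
  simp only [rev_eq_G_reverse, List.reverse_reverse, PySem.List.slice_from_one]
  have : (fun (t : Int) (p : String × Int) => if p.1 = "a" then t + p.2 else t) = pvSumStep := rfl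
  rw [this, zip_G_eq_F]

-- ===== VERDICT (by name: the statement is the Claim_ definition above) =====
theorem carryForward_spec : Claim_equal_carryForward := by
  intro A _
  unfold Spec_carryForward
  rw [carryForward_eq_F, alt_eq_F]
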